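-- pv_equiv track=rewrite | github.com/AlternativeFuture/guided_learning | dealer_on_duty /day_17/assignment_2.py | number_length_and_sum_of_digits
-- ===== SOURCE A (Python) =====
-- def number_length_and_sum_of_digits(number: int) -> tuple:
--     number = abs(number)
--     if number == 0:
--         return 1, 0
--
--     length = 0
--     sum_of_digits = 0
--
--     while number > 0:
--         length += 1
--         number, remainder = divmod(number, 10)
--         sum_of_digits += remainder
--     return length, sum_of_digits
-- ===== SOURCE B (Python) =====
-- def number_length_and_sum_of_digits(number: int) -> tuple:
--     s = str(abs(number))
--     return len(s), sum(int(c) for c in s)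
-- ===== Notes on version B (the rewrite author's own statement) =====
-- stated objective: idiomatic
-- what changed: Replaces the divmod while-loop (with an explicit zero special case) by converting abs(number) to its decimal string once and taking len() and a digit-sum comprehension over the characters.
import Mathlib
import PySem

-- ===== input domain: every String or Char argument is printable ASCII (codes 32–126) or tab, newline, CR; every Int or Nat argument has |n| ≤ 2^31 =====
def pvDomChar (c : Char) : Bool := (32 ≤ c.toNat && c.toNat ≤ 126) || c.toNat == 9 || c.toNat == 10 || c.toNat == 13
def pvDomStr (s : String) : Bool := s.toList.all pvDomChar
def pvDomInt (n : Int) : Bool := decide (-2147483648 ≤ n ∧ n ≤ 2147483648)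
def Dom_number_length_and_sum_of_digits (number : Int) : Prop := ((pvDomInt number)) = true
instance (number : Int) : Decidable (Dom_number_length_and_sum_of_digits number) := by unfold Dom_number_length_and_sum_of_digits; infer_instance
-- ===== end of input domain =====

-- B replaces A's divmod while-loop (and its zero special case) by len() and a digit-sum over str(abs(number)); objective: idiomatic.

-- ===== PORT A =====
-- the while-loop of A: while number > 0: length += 1; number, remainder = divmod(number, 10); sum_of_digits += remainder
def pvGoA (number length sum_of_digits : Int) : Int × Int :=
  if number > 0 then
    pvGoA (PySem.Int.floordiv number 10) (length + 1) (sum_of_digits + PySem.Int.mod number 10)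
  else (length, sum_of_digits)
termination_by number.toNat
decreasing_by
  rw [PySem.Int.floordiv_eq_ediv_of_pos (by omega : (0:Int) < 10)]
  omega

def number_length_and_sum_of_digits (number : Int) : Int × Int :=
  let number := |number|
  if number = 0 then (1, 0)
  else pvGoA number 0 0

-- ===== PORT B =====
-- s = str(abs(number)); return len(s), sum(int(c) for c in s)
-- int(c) on the decimal-digit characters of s is ported by hand as c.toNat - 48 (exact on digit chars '0'..'9').
def number_length_and_sum_of_digits_alt (number : Int) : Int × Int :=
  let s := PySem.Int.toChars |number|
  ((s.length : Int), s.foldl (fun acc c => acc + ((c.toNat : Int) - 48)) 0)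

-- ===== PRECONDITION & SPEC =====
def Spec_number_length_and_sum_of_digits (number : Int) (out : Int × Int) : Prop := out = number_length_and_sum_of_digits_alt number
instance (number : Int) (out : Int × Int) : Decidable (Spec_number_length_and_sum_of_digits number out) := by unfold Spec_number_length_and_sum_of_digits; infer_instance

-- ===== CLAIM (what is proved, stated in full; the proofs are below) =====
def Claim_equal_number_length_and_sum_of_digits : Prop := ∀ (number : Int), Dom_number_length_and_sum_of_digits number → Spec_number_length_and_sum_of_digits number (number_length_and_sum_of_digits number)

-- ===== LEMMAS AND PROOFS =====

-- decimal digit characters of n, most significant first (spec of Nat.toDigits 10)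
def pvD (n : Nat) : List Char :=
  if h : n < 10 then [Nat.digitChar n]
  else pvD (n / 10) ++ [Nat.digitChar (n % 10)]
termination_by n
decreasing_by exact Nat.div_lt_self (by omega) (by omega)

theorem pvToDigitsCore_eq (n : Nat) : ∀ (fuel : Nat) (ds : List Char), n < fuel →
    Nat.toDigitsCore 10 fuel n ds = pvD n ++ ds := by
  induction n using Nat.strong_induction_on with
  | _ n ih =>
    intro fuel ds hf
    match fuel with
    | 0 => omega
    | f + 1 =>
      rw [Nat.toDigitsCore]
      by_cases h : n < 10
      · have h0 : n / 10 = 0 := Nat.div_eq_of_lt h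
        have hm : n % 10 = n := Nat.mod_eq_of_lt h
        simp [h0, hm, pvD, h]
      · have hlt : n / 10 < n := Nat.div_lt_self (by omega) (by omega)
        have hne : ¬ n / 10 = 0 := by
          intro h0; have := Nat.lt_of_div_eq_zero (by omega) h0; omega
        simp only [hne, if_false]
        rw [ih (n / 10) hlt f _ (by omega)]
        have hD : pvD n = pvD (n / 10) ++ [Nat.digitChar (n % 10)] := by
          rw [pvD]; simp [h]
        rw [hD, List.append_assoc]; rfl

theorem pvDchar (k : Nat) (hk : k < 10) : ((Nat.digitChar k).toNat : Int) - 48 = (k : Int) := by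
  interval_cases k <;> decide

theorem pvGoA_eq (n : Nat) : 0 < n → ∀ (L S : Int),
    pvGoA (n : Int) L S =
      (L + ((pvD n).length : Int),
       S + (pvD n).foldl (fun acc c => acc + ((c.toNat : Int) - 48)) 0) := by
  induction n using Nat.strong_induction_on with
  | _ n ih =>
    intro hn L S
    rw [pvGoA]
    have hpos : (0:Int) < (n : Int) := by exact_mod_cast hn
    simp only [hpos, if_pos]
    have hf : PySem.Int.floordiv (n:Int) 10 = ((n/10 : Nat) : Int) := by
      exact_mod_cast PySem.Int.floordiv_natCast n 10
    have hm : PySem.Int.mod (n:Int) 10 = ((n%10 : Nat) : Int) := by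
      exact_mod_cast PySem.Int.mod_natCast n 10
    rw [hf, hm]
    by_cases h : n < 10
    · have h0 : n / 10 = 0 := Nat.div_eq_of_lt h
      have hm : n % 10 = n := Nat.mod_eq_of_lt h
      rw [h0, pvGoA]
      have hD : pvD n = [Nat.digitChar n] := by rw [pvD]; simp [h]
      have := pvDchar n h
      simp only [hD, hm, List.length_singleton, List.foldl, Nat.cast_one]
      rw [this]
      norm_num
    · have hlt : n / 10 < n := Nat.div_lt_self (by omega) (by omega)
      have hne : 0 < n / 10 := Nat.div_pos (by omega) (by omega)
      rw [ih (n / 10) hlt hne]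
      have hD : pvD n = pvD (n / 10) ++ [Nat.digitChar (n % 10)] := by
        rw [pvD]; simp [h]
      rw [hD]
      have hmod := pvDchar (n % 10) (Nat.mod_lt _ (by omega))
      simp only [List.length_append, List.foldl_append, List.foldl, List.length_singleton]
      rw [hmod]
      simp only [Prod.mk.injEq]; constructor <;> push_cast <;> ring

-- ===== VERDICT (by name: the statement is the Claim_ definition above) =====
theorem number_length_and_sum_of_digits_spec : Claim_equal_number_length_and_sum_of_digits := by
  intro number _
  unfold Spec_number_length_and_sum_of_digits number_length_and_sum_of_digits number_length_and_sum_of_digits_alt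
  by_cases h0 : number = 0
  · subst h0; decide
  · have habs : |number| = (number.natAbs : Int) := Int.abs_eq_natAbs number
    have hpos : 0 < number.natAbs := Int.natAbs_pos.mpr h0
    simp only [habs]
    have hne : ¬ ((number.natAbs : Int) = 0) := by exact_mod_cast Nat.pos_iff_ne_zero.mp hpos
    simp only [hne, if_neg, not_false_iff]
    rw [pvGoA_eq number.natAbs hpos 0 0]
    have htc : PySem.Int.toChars (number.natAbs : Int) = pvD number.natAbs := by
      unfold PySem.Int.toChars
      have : ¬ ((number.natAbs : Int) < 0) := by omega
      simp only [this, if_neg, not_false_iff, Int.toNat_natCast]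
      unfold Nat.toDigits
      rw [pvToDigitsCore_eq number.natAbs (number.natAbs + 1) [] (by omega)]
      simp
    simp only [htc]
    simp
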